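-- pv_equiv track=rewrite | github.com/StrunetsD/study | 6_lesson/8.py | max_in_matrix
-- ===== SOURCE A (Python) =====
-- def max_in_matrix(matrix, m):
--     temp = matrix[0][0]
--     max_index = (0, 0)
--     for i in range(len(matrix)):
--         for j in range(len(matrix[i])):
--             if matrix[i][j] > temp:
--                 temp = matrix[i][j]
--                 max_index = (i, j)
--
--     return max_index
-- ===== SOURCE B (Python) =====
-- def max_in_matrix(matrix, m):
--     # Build per-row candidates (row max, row index, first column of that max),
--     # then combine with a strict-greater scan so the earliest row/column wins ties.
--     candidates = []
--     for i, row in enumerate(matrix):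
--         if row:
--             v = max(row)
--             candidates.append((v, i, row.index(v)))
--     bv, bi, bj = candidates[0]
--     for v, i, j in candidates[1:]:
--         if v > bv:
--             bv, bi, bj = v, i, j
--     return (bi, bj)
-- ===== Notes on version B (the rewrite author's own statement) =====
-- stated objective: alternative
-- what changed: B replaces A's interleaved double loop with a two-stage build-then-combine: it first summarises each non-empty row as (max value, row, first column of that max) via max/list.index, then a single strict-greater scan over these candidates picks the winning (i, j).
import Mathlib
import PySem

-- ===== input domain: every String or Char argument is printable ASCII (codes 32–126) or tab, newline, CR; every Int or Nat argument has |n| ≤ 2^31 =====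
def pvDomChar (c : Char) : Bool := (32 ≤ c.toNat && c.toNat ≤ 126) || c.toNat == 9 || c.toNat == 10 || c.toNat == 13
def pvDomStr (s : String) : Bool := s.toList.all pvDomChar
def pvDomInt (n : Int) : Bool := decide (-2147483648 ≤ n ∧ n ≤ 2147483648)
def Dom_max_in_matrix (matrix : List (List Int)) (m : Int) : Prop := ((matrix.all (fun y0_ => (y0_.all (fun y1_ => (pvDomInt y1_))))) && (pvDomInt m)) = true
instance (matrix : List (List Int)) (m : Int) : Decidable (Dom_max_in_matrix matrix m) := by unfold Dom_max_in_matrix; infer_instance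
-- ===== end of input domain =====

-- B builds per-row (max, row, first column) candidates first and then combines them with one
-- strict-greater scan, instead of A's interleaved double loop (objective: alternative).

-- ===== PORT A =====
def max_in_matrix (matrix : List (List Int)) (m : Int) : Int × Int :=
  -- temp = matrix[0][0]  (Pre_ excludes the IndexError case, so the default is never read)
  let temp : Int := PySem.List.pyGetD (PySem.List.pyGetD matrix 0 []) 0 0
  let st :=
    (PySem.List.pyRange 0 (matrix.length : Int) 1).foldl (fun st i =>
      let row := PySem.List.pyGetD matrix i []
      (PySem.List.pyRange 0 (row.length : Int) 1).foldl (fun st j =>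
        if PySem.List.pyGetD row j 0 > st.1 then (PySem.List.pyGetD row j 0, (i, j)) else st)
        st)
      (temp, ((0 : Int), (0 : Int)))
  st.2

-- ===== PORT B =====
def max_in_matrix_alt (matrix : List (List Int)) (m : Int) : Int × Int :=
  let candidates : List (Int × Int × Int) :=
    (PySem.List.enumerate matrix 0).foldl (fun acc q =>
      if q.2 ≠ [] then
        let v := (PySem.List.max? q.2 (fun y => y)).getD 0
        acc ++ [(v, q.1, (((PySem.List.index? q.2 v).getD 0 : Nat) : Int))]
      else acc) []
  match candidates with
  | [] => (0, 0)  -- Source B raises IndexError here (candidates[0]); outside Pre_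
  | c0 :: rest =>
    let b := rest.foldl (fun b c => if c.1 > b.1 then c else b) c0
    (b.2.1, b.2.2)

-- ===== PRECONDITION & SPEC =====
-- A raises IndexError at matrix[0][0] unless the matrix and its first row are non-empty.
def Pre_max_in_matrix (matrix : List (List Int)) (m : Int) : Prop :=
  matrix ≠ [] ∧ matrix.headD [] ≠ []
instance (matrix : List (List Int)) (m : Int) : Decidable (Pre_max_in_matrix matrix m) := by
  unfold Pre_max_in_matrix; infer_instance

def pvWitness_max_in_matrix : List (List Int) × Int := ([[1, 2], [3]], 0)

def Spec_max_in_matrix (matrix : List (List Int)) (m : Int) (out : Int × Int) : Prop := out = max_in_matrix_alt matrix m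
instance (matrix : List (List Int)) (m : Int) (out : Int × Int) : Decidable (Spec_max_in_matrix matrix m out) := by unfold Spec_max_in_matrix; infer_instance

-- ===== CLAIM (what is proved, stated in full; the proofs are below) =====
def Claim_equal_max_in_matrix : Prop := ∀ (matrix : List (List Int)) (m : Int), Dom_max_in_matrix matrix m → Pre_max_in_matrix matrix m → Spec_max_in_matrix matrix m (max_in_matrix matrix m)

-- ===== LEMMAS AND PROOFS =====

-- max of a non-empty row, as the running-max loop (0 is a dummy for the impossible [] case)
def rmax : List Int → Int
  | [] => 0
  | x :: r => r.foldl max x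

lemma foldl_max_shift (l : List Int) (a b : Int) :
    l.foldl max (max a b) = max a (l.foldl max b) := by
  induction l generalizing b with
  | nil => rfl
  | cons y t ih => simp only [List.foldl_cons, max_assoc, ih]

lemma rmax_mem (x : Int) (r : List Int) : rmax (x :: r) ∈ x :: r := by
  rcases PySem.List.foldl_max_mem r x with h | h
  · rw [rmax]; rw [h]; exact List.mem_cons_self
  · exact List.mem_cons_of_mem _ (by rw [rmax]; exact h)

lemma le_rmax (x : Int) (r : List Int) : x ≤ rmax (x :: r) :=
  (PySem.List.le_foldl_max r x).1

lemma index?_getD_of_mem (l : List Int) (v : Int) (h : v ∈ l) :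
    ((PySem.List.index? l v).getD 0 : Nat) = l.idxOf v := by
  induction l with
  | nil => simp at h
  | cons y t ih =>
    by_cases hy : y = v
    · subst hy; rw [PySem.List.index?_cons_self]; simp
    · rw [PySem.List.index?_cons_of_ne t hy]
      rcases List.mem_cons.1 h with h' | h'
      · exact absurd h'.symm hy
      · have hs := PySem.List.index?_isSome_iff (xs := t) (v := v)
        rcases ho : PySem.List.index? t v with _ | k
        · rw [ho] at hs; simp at hs; exact absurd h' hs
        · have hk := ih h'
          rw [ho] at hk
          simp only [Option.map_some, Option.getD_some]
          rw [List.idxOf_cons_ne t hy]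
          simp at hk
          omega

-- A's inner loop over one (non-empty) row, characterised: new temp and new index
lemma innerA_char (i x : Int) (r : List Int) : ∀ (s t : Int) (pr : Int × Int),
    (PySem.List.enumerate (x :: r) s).foldl
      (fun st p => if p.2 > st.1 then (p.2, (i, p.1)) else st) (t, pr)
    = (max t (rmax (x :: r)),
       if rmax (x :: r) > t then (i, s + ((x :: r).idxOf (rmax (x :: r)) : Int)) else pr) := by
  induction r generalizing x with
  | nil =>
    intro s t pr
    simp only [PySem.List.enumerate_cons, PySem.List.enumerate_nil, List.foldl_cons,
      List.foldl_nil, rmax]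
    by_cases h : x > t
    · rw [if_pos h, if_pos h, List.idxOf_cons_self]
      simp only [Nat.cast_zero, add_zero]
      refine Prod.ext ?_ rfl
      simp only
      omega
    · rw [if_neg h, if_neg h]
      refine Prod.ext ?_ rfl
      simp only
      omega
  | cons y r' ih =>
    intro s t pr
    rw [PySem.List.enumerate_cons, List.foldl_cons]
    have hM : rmax (x :: y :: r') = max x (rmax (y :: r')) := foldl_max_shift r' x y
    dsimp only
    rw [hM]
    by_cases hx : x > t
    · rw [if_pos hx, ih y (s + 1) x (i, s)]
      by_cases hm : rmax (y :: r') > x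
      · have hne : x ≠ rmax (y :: r') := by omega
        rw [if_pos hm, show max x (rmax (y :: r')) = rmax (y :: r') from by omega,
          if_pos (by omega : rmax (y :: r') > t), List.idxOf_cons_ne _ hne]
        refine Prod.ext (by omega) (Prod.ext rfl ?_)
        push_cast [Nat.succ_eq_add_one]
        omega
      · rw [if_neg hm, show max x (rmax (y :: r')) = x from by omega,
          if_pos hx, List.idxOf_cons_self]
        refine Prod.ext (by omega) ?_
        simp
    · rw [if_neg hx, ih y (s + 1) t pr]
      by_cases hm : rmax (y :: r') > t
      · have hne : x ≠ rmax (y :: r') := by omega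
        rw [if_pos hm, show max x (rmax (y :: r')) = rmax (y :: r') from by omega,
          if_pos hm, List.idxOf_cons_ne _ hne]
        refine Prod.ext (by omega) (Prod.ext rfl ?_)
        push_cast [Nat.succ_eq_add_one]
        omega
      · rw [if_neg hm, if_neg (by omega : ¬ max x (rmax (y :: r')) > t)]
        exact Prod.ext (by omega) rfl

-- A's outer loop equals B's strict-greater scan over the row candidates
lemma outerA_char (rs : List (List Int)) : ∀ (s v : Int) (pr : Int × Int),
    (PySem.List.enumerate rs s).foldl
      (fun st q => (PySem.List.enumerate q.2 0).foldl
        (fun st p => if p.2 > st.1 then (p.2, (q.1, p.1)) else st) st) (v, pr)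
    = (let cs := ((PySem.List.enumerate rs s).filter (fun q => decide (q.2 ≠ []))).map
          (fun q => (rmax q.2, q.1, (q.2.idxOf (rmax q.2) : Int)))
       let b := cs.foldl (fun b c => if c.1 > b.1 then c else b) (v, pr.1, pr.2)
       (b.1, (b.2.1, b.2.2))) := by
  induction rs with
  | nil =>
    intro s v pr
    simp [PySem.List.enumerate_nil]
  | cons r rs' ih =>
    intro s v pr
    dsimp only
    rw [PySem.List.enumerate_cons, List.foldl_cons]
    cases r with
    | nil =>
      simp only [PySem.List.enumerate_nil, List.foldl_nil]
      rw [ih (s + 1) v pr]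
      simp
    | cons x r' =>
      have h1 := innerA_char s x r' 0 v pr
      simp only [zero_add] at h1
      rw [h1]
      have hle : x ≤ rmax (x :: r') := le_rmax x r'
      set M := rmax (x :: r') with hMdef
      have hfilter : List.filter (fun q => decide (q.2 ≠ []))
          (((s, x :: r') : Int × List Int) :: PySem.List.enumerate rs' (s + 1))
          = (s, x :: r') :: List.filter (fun q => decide (q.2 ≠ []))
              (PySem.List.enumerate rs' (s + 1)) := by
        simp
      rw [hfilter, List.map_cons, List.foldl_cons]
      by_cases hm : M > v
      · rw [if_pos hm, show max v M = M from by omega]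
        rw [ih (s + 1) M ((s : Int), ((x :: r').idxOf M : Int))]
        simp only
        rw [if_pos hm]
      · rw [if_neg hm, show max v M = v from by omega]
        rw [ih (s + 1) v pr]
        simp only
        rw [if_neg hm]

-- A's port with the index loops re-expressed as enumerate folds
lemma portA_eq (matrix : List (List Int)) (m : Int) :
    max_in_matrix matrix m =
    ((PySem.List.enumerate matrix 0).foldl
       (fun st q => (PySem.List.enumerate q.2 0).foldl
          (fun st p => if p.2 > st.1 then (p.2, (q.1, p.1)) else st) st)
       (PySem.List.pyGetD (PySem.List.pyGetD matrix 0 []) 0 0, ((0 : Int), (0 : Int)))).2 := by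
  rw [max_in_matrix]
  congr 1
  rw [PySem.List.enumerate_eq_map_pyRange matrix [], List.foldl_map]
  simp only [PySem.List.len_eq]
  apply PySem.List.foldl_congr_mem
  intro acc i _
  rw [PySem.List.enumerate_eq_map_pyRange (PySem.List.pyGetD matrix i []) 0, List.foldl_map]
  simp only [PySem.List.len_eq]

-- B's candidate summary agrees with (rmax, idxOf) on non-empty rows
lemma cand_eq (q : Int × List Int) (h : q.2 ≠ []) :
    ((PySem.List.max? q.2 (fun y => y)).getD 0, q.1,
      (((PySem.List.index? q.2 ((PySem.List.max? q.2 (fun y => y)).getD 0)).getD 0 : Nat) : Int))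
    = (rmax q.2, q.1, (q.2.idxOf (rmax q.2) : Int)) := by
  obtain ⟨i, l⟩ := q
  cases l with
  | nil => exact absurd rfl h
  | cons x r =>
    rw [PySem.List.max?_id_cons]
    simp only [Option.getD_some]
    rw [show List.foldl max x r = rmax (x :: r) from rfl,
      index?_getD_of_mem _ _ (rmax_mem x r)]

-- ===== VERDICT (by name: the statement is the Claim_ definition above) =====
theorem max_in_matrix_spec : Claim_equal_max_in_matrix := by
  intro matrix m _ hpre
  obtain ⟨hne, hrow⟩ := hpre
  unfold Spec_max_in_matrix
  cases matrix with
  | nil => exact absurd rfl hne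
  | cons row rs =>
    cases row with
    | nil => simp at hrow
    | cons x r0 =>
      -- A side
      rw [portA_eq]
      rw [PySem.List.pyGetD_zero_cons, PySem.List.pyGetD_zero_cons]
      rw [PySem.List.enumerate_cons, List.foldl_cons]
      have h1 := innerA_char 0 x r0 0 x ((0 : Int), (0 : Int))
      simp only [zero_add] at h1
      rw [h1]
      have hle : x ≤ rmax (x :: r0) := le_rmax x r0
      set M := rmax (x :: r0) with hMdef
      have hst1 : (if M > x then ((0 : Int), ((x :: r0).idxOf M : Int)) else ((0 : Int), (0 : Int)))
          = ((0 : Int), ((x :: r0).idxOf M : Int)) := by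
        by_cases hm : M > x
        · rw [if_pos hm]
        · rw [if_neg hm]
          have hMx : M = x := by omega
          rw [hMx, List.idxOf_cons_self]
          simp
      rw [show max x M = M from by omega, hst1]
      simp only [zero_add]
      rw [outerA_char rs 1 M ((0 : Int), ((x :: r0).idxOf M : Int))]
      -- B side
      rw [max_in_matrix_alt]
      simp only
      rw [PySem.List.foldl_append_ite (fun (q : Int × List Int) => q.2 ≠ [])
        (fun q => ((PySem.List.max? q.2 (fun y => y)).getD 0, q.1,
          (((PySem.List.index? q.2 ((PySem.List.max? q.2 (fun y => y)).getD 0)).getD 0 : Nat) : Int)))]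
      rw [PySem.List.enumerate_cons]
      rw [show List.filter (fun (q : Int × List Int) => decide (q.2 ≠ []))
            (((0 : Int), x :: r0) :: PySem.List.enumerate rs (0 + 1))
          = ((0 : Int), x :: r0) :: List.filter (fun q => decide (q.2 ≠ []))
              (PySem.List.enumerate rs (0 + 1)) from by simp]
      rw [List.map_cons, List.nil_append]
      rw [List.map_congr_left (fun q hq => cand_eq q (by
        have := List.of_mem_filter hq
        simpa using this))]
      rw [cand_eq ((0 : Int), x :: r0) (by simp)]
      simp only [zero_add]
      rfl
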